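-- pv_equiv track=rewrite | github.com/mariambuzaladze/Pytest | vanity_plates/plates.py | is_valid
-- ===== SOURCE A (Python) =====
-- def is_valid(s):
--     if not (2 <= len(s) <= 6):
--         return False
--
--     if not s[:2].isalpha():
--         return False
--
--     if not s.isalnum():
--         return False
--
--     has_number = False
--     for char in s:
--         if char.isdigit():
--             if char == '0' and not has_number:
--                 return False
--             has_number = True
--         elif has_number:
--             return False
--
--     return True
-- ===== SOURCE B (Python) =====
-- def is_valid(s):
--     if not (2 <= len(s) <= 6):
--         return False
--     if not s[:2].isalpha():
--         return False
--     if not s.isalnum():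
--         return False
--     idx = next((i for i, c in enumerate(s) if c.isdigit()), len(s))
--     if any(not c.isdigit() for c in s[idx:]):
--         return False
--     if idx < len(s) and s[idx] == '0':
--         return False
--     return True
-- ===== Notes on version B (the rewrite author's own statement) =====
-- stated objective: alternative
-- what changed: Replaces A's stateful single pass with a flag by locating the first digit's index and then separately checking that the suffix from that index is all digits and does not start with a zero digit.
import Mathlib
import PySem

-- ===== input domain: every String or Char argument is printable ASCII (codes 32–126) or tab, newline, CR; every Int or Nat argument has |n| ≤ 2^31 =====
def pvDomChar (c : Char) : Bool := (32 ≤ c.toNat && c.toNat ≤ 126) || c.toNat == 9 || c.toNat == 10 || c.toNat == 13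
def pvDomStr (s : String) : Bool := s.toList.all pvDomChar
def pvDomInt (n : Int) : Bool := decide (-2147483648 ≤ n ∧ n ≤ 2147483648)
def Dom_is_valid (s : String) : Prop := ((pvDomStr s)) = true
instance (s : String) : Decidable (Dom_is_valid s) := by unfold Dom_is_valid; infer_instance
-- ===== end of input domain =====

-- B restructures A's flag-based single pass into a first-digit-index computation plus
-- separate suffix checks; return values are proved equal on all Dom inputs (objective: alternative).

-- ===== PORT A =====
-- the flag loop: 'has_number' state threaded through the characters
def isvalidLoop : List Char → Bool → Bool
  | [], _ => true
  | c :: rest, has =>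
      if PySem.Chars.isdigit c then
        if c == '0' && !has then false
        else isvalidLoop rest true
      else if has then false
      else isvalidLoop rest has

def is_valid (s : String) : Bool :=
  let cs := s.toList
  if !(decide (2 ≤ PySem.Chars.len cs ∧ PySem.Chars.len cs ≤ 6)) then false
  else if !PySem.Chars.strIsalpha (PySem.Chars.slice cs none (some 2)) then false
  else if !PySem.Chars.strIsalnum cs then false
  else isvalidLoop cs false

-- ===== PORT B =====
-- index of the first digit (length of cs if none), B's 'next((i for i,c in enumerate(s) ...), len(s))'
def firstDigitIdx : List Char → Nat
  | [] => 0
  | c :: rest => if PySem.Chars.isdigit c then 0 else firstDigitIdx rest + 1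

def is_valid_alt (s : String) : Bool :=
  let cs := s.toList
  if !(decide (2 ≤ PySem.Chars.len cs ∧ PySem.Chars.len cs ≤ 6)) then false
  else if !PySem.Chars.strIsalpha (PySem.Chars.slice cs none (some 2)) then false
  else if !PySem.Chars.strIsalnum cs then false
  else
    let idx := firstDigitIdx cs
    if (PySem.List.slice cs (some (idx : Int)) none).any (fun c => !PySem.Chars.isdigit c) then false
    else if decide (idx < cs.length) && (PySem.List.pyGetD cs (idx : Int) ' ' == '0') then false
    else true

-- ===== PRECONDITION & SPEC =====
def Spec_is_valid (s : String) (out : Bool) : Prop := out = is_valid_alt s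
instance (s : String) (out : Bool) : Decidable (Spec_is_valid s out) := by unfold Spec_is_valid; infer_instance

-- ===== CLAIM (what is proved, stated in full; the proofs are below) =====
def Claim_equal_is_valid : Prop := ∀ (s : String), Dom_is_valid s → Spec_is_valid s (is_valid s)

-- ===== LEMMAS AND PROOFS =====

-- with the flag already set, the loop just demands digits to the end
lemma isvalidLoop_true (cs : List Char) :
    isvalidLoop cs true = cs.all PySem.Chars.isdigit := by
  induction cs with
  | nil => rfl
  | cons c rest ih =>
      simp only [isvalidLoop, List.all_cons]
      by_cases h : PySem.Chars.isdigit c = true <;> simp [h, ih]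

-- the flag loop equals B's tail computation, for every character list
lemma loop_eq_tail (cs : List Char) :
    isvalidLoop cs false =
      (if (PySem.List.slice cs (some ((firstDigitIdx cs : Nat) : Int)) none).any (fun c => !PySem.Chars.isdigit c) then false
       else if decide (firstDigitIdx cs < cs.length) && (PySem.List.pyGetD cs ((firstDigitIdx cs : Nat) : Int) ' ' == '0') then false
       else true) := by
  induction cs with
  | nil => simp [isvalidLoop, firstDigitIdx, PySem.List.slice]
  | cons c rest ih =>
      by_cases h : PySem.Chars.isdigit c = true
      · simp only [isvalidLoop, firstDigitIdx, h, if_pos, Nat.cast_zero,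
          PySem.List.pyGetD_zero_cons]
        by_cases h0 : c = '0'
        · simp [h0]
        · have hne : (c == '0') = false := by simp [h0]
          simp only [hne, Bool.and_false, Bool.false_and, Bool.false_eq_true, if_neg,
            not_false_iff]
          rw [isvalidLoop_true]
          simp only [PySem.List.slice_zero_start, PySem.List.slice_none_none,
            List.all_eq, List.any_eq]
          by_cases hall : ∀ x ∈ rest, PySem.Chars.isdigit x = true
          · have h2 : ¬ ∃ a ∈ rest, PySem.Chars.isdigit a = false := by
              rintro ⟨a, ha, had⟩; rw [hall a ha] at had; cases had
            simp [h, h2]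
            exact hall
          · obtain ⟨x, hx, hxd⟩ := not_forall₂.mp hall
            have hnall : ¬ ∀ x ∈ rest, PySem.Chars.isdigit x = true := hall
            simp [hnall]
            exact fun _ => ⟨x, hx, by simpa using hxd⟩
      · have hb : PySem.Chars.isdigit c = false := by simpa using h
        simp only [isvalidLoop, hb, Bool.false_eq_true, if_neg, firstDigitIdx,
          not_false_iff]
        rw [ih]
        have hdrop : PySem.List.slice (c :: rest) (some ((firstDigitIdx rest + 1 : Nat) : Int)) none
            = PySem.List.slice rest (some ((firstDigitIdx rest : Nat) : Int)) none := by
          rw [PySem.List.slice_from_natCast, PySem.List.slice_from_natCast]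
          rfl
        have hget : PySem.List.pyGetD (c :: rest) ((firstDigitIdx rest + 1 : Nat) : Int) ' '
            = PySem.List.pyGetD rest ((firstDigitIdx rest : Nat) : Int) ' ' := by
          simp [PySem.List.pyGetD]
        have hlt : decide (firstDigitIdx rest + 1 < (c :: rest).length)
            = decide (firstDigitIdx rest < rest.length) := by
          simp
        rw [hdrop, hget, hlt]

-- ===== VERDICT (by name: the statement is the Claim_ definition above) =====
theorem is_valid_spec : Claim_equal_is_valid := by
  intro s _
  unfold Spec_is_valid is_valid is_valid_alt
  simp only [loop_eq_tail]
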